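-- pv_equiv track=rewrite | github.com/eliotbaez/asciicodecbot2 | functions.py | encode_base64
-- ===== SOURCE A (Python) =====
-- def encode_base64(string_in = ""):
--     string_out = ""
--     length_in = len(string_in) # faster to read a variable than call a function
--     i = 0
--     group = 0
--     empty_bytes = (3 - (length_in % 3)) % 3
--     # split byte triplets into groups of three 6-bit characters
--     while i < length_in:
--         group = 0
--         if length_in - i <= 3: # only if on last triplet
--             group |= (ord(string_in[i]) << 16) # first byte will always be valid
--             if empty_bytes == 1 or empty_bytes == 0: # if only last byte will need padding or none needed
--                 group |= (ord(string_in[i + 1]) << 8)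
--             if empty_bytes == 0: # if no padding will be needed
--                 group |= ord(string_in[i + 2])
--         else: # for all other byte triplets
--             group |= (ord(string_in[i]) << 16)
--             group |= (ord(string_in[i + 1]) << 8)
--             group |= ord(string_in[i + 2])
--
--         # now split into four 6-byte characters
--         for char in range(3,-1,-1): # range of 3, 2, 1, 0
--             c = (group >> (6 * char)) & 63
--             # append the character to the output string
--             string_out += chr(c)
--         i += 3
--     # convert string to list to assign individual characters
--     list_out = list(string_out)
--     # translate output characters into valid text
--     i = 0
--     while i < len(string_out):
--         c = ord(list_out[i])
--         if 0 <= c and c <= 25: # capital alphabet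
--             c += 65
--         elif 26 <= c and c <= 51: # lowercase alphabet
--             c += 71
--         elif 52 <= c and c <= 61: # numbers
--             c -= 4
--         elif c == 62: # '+' symbol
--             c = 43
--         elif c == 63: # '/' symbol
--             c = 47
--         list_out[i] = chr(c)
--         i += 1
--     # overwrite padding characters
--     for i in range(len(list_out) - empty_bytes, len(list_out)):
--         list_out[i] = '='
--     string_out = "".join(list_out)
--     return string_out
-- ===== SOURCE B (Python) =====
-- ALPHABET = "ABCDEFGHIJKLMNOPQRSTUVWXYZabcdefghijklmnopqrstuvwxyz0123456789+/"
--
-- def encode_base64(string_in = ""):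
--     out = []
--     s = string_in
--     while s:
--         chunk = s[:3]
--         s = s[3:]
--         if len(chunk) == 1:
--             group = ord(chunk[0]) << 16
--         elif len(chunk) == 2:
--             group = (ord(chunk[0]) << 16) | (ord(chunk[1]) << 8)
--         else:
--             group = (ord(chunk[0]) << 16) | (ord(chunk[1]) << 8) | ord(chunk[2])
--         out.append(ALPHABET[(group >> 18) & 63])
--         out.append(ALPHABET[(group >> 12) & 63])
--         out.append(ALPHABET[(group >> 6) & 63])
--         out.append(ALPHABET[group & 63])
--     pad = (3 - len(string_in) % 3) % 3
--     return "".join(out[:len(out) - pad]) + "=" * pad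
-- ===== Notes on version B (the rewrite author's own statement) =====
-- stated objective: simpler
-- what changed: Replaced A's three passes (build raw 6-bit codes with while/index arithmetic, translate each code with a 5-branch if-chain, overwrite padding in a list) by a single slice-driven chunk loop that looks each 6-bit value up in a base64 alphabet table.
import Mathlib
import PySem

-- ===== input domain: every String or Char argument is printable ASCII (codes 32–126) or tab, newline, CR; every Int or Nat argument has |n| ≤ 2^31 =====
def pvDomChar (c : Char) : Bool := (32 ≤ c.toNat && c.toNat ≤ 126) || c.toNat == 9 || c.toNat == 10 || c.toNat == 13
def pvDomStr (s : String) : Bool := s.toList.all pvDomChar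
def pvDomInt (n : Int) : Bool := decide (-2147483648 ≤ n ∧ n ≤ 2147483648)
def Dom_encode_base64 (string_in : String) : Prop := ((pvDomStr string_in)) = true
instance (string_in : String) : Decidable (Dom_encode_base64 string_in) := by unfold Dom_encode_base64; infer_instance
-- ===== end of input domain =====

-- B replaces A's three passes (raw 6-bit codes via index arithmetic, an if-chain translating
-- each code, a padding overwrite) by one slice-driven chunk loop with an alphabet-table lookup.

-- ===== PORT A =====
-- ord(string_in[i]); every access A performs is guarded in range, so the ' ' default never fires
def pvOrdAt (s : List Char) (i : Nat) : Nat := (s.getD i ' ').toNat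

-- A's first while loop: i steps by 3, appending four chr((group >> 6*char) & 63)
def pvEncALoop (s : List Char) (length_in empty_bytes i : Nat) (string_out : List Char) : List Char :=
  if _h : i < length_in then
    let group : Nat :=
      if length_in - i ≤ 3 then
        let g := pvOrdAt s i <<< 16
        let g := if empty_bytes = 1 ∨ empty_bytes = 0 then g ||| (pvOrdAt s (i+1) <<< 8) else g
        let g := if empty_bytes = 0 then g ||| pvOrdAt s (i+2) else g
        g
      else
        (pvOrdAt s i <<< 16) ||| (pvOrdAt s (i+1) <<< 8) ||| pvOrdAt s (i+2)
    -- for char in range(3,-1,-1): string_out += chr((group >> 6*char) & 63)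
    let quad := [3,2,1,0].map (fun ch => Char.ofNat ((group >>> (6 * ch)) &&& 63))
    pvEncALoop s length_in empty_bytes (i + 3) (string_out ++ quad)
  else string_out
termination_by length_in - i

-- A's second pass: the 5-branch if-chain translating a raw code into a base64 character
def pvTranslate (c : Nat) : Nat :=
  if c ≤ 25 then c + 65
  else if 26 ≤ c ∧ c ≤ 51 then c + 71
  else if 52 ≤ c ∧ c ≤ 61 then c - 4
  else if c = 62 then 43
  else if c = 63 then 47
  else c

def encode_base64 (string_in : String) : String :=
  let s := string_in.toList
  let length_in := s.length
  let empty_bytes := (3 - length_in % 3) % 3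
  let string_out := pvEncALoop s length_in empty_bytes 0 []
  -- translation pass over list_out
  let list_out := string_out.map (fun c => Char.ofNat (pvTranslate c.toNat))
  -- overwrite the last empty_bytes characters with '='
  String.mk (list_out.take (list_out.length - empty_bytes) ++ List.replicate (min empty_bytes list_out.length) '=')

-- ===== PORT B =====
def pvALPHABET : List Char := "ABCDEFGHIJKLMNOPQRSTUVWXYZabcdefghijklmnopqrstuvwxyz0123456789+/".toList

-- one quad of table lookups (indices are & 63, hence in range; the '=' default never fires)
def pvQuad (group : Nat) : List Char :=
  [pvALPHABET.getD ((group >>> 18) &&& 63) '=', pvALPHABET.getD ((group >>> 12) &&& 63) '=',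
   pvALPHABET.getD ((group >>> 6) &&& 63) '=', pvALPHABET.getD (group &&& 63) '=']

-- Source B's `while s: chunk = s[:3]; s = s[3:]` with its if/elif chain on len(chunk)
def pvEncBLoop : List Char → List Char
  | [] => []
  | [a] => pvQuad (a.toNat <<< 16)
  | [a, b] => pvQuad ((a.toNat <<< 16) ||| (b.toNat <<< 8))
  | a :: b :: c :: rest => pvQuad ((a.toNat <<< 16) ||| (b.toNat <<< 8) ||| c.toNat) ++ pvEncBLoop rest

def encode_base64_alt (string_in : String) : String :=
  let l := string_in.toList
  let out := pvEncBLoop l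
  let pad := (3 - l.length % 3) % 3
  String.mk (out.take (out.length - pad) ++ List.replicate pad '=')

-- ===== PRECONDITION & SPEC =====
def Spec_encode_base64 (string_in : String) (out : String) : Prop := out = encode_base64_alt string_in
instance (string_in : String) (out : String) : Decidable (Spec_encode_base64 string_in out) := by unfold Spec_encode_base64; infer_instance

-- ===== CLAIM (what is proved, stated in full; the proofs are below) =====
def Claim_equal_encode_base64 : Prop := ∀ (string_in : String), Dom_encode_base64 string_in → Spec_encode_base64 string_in (encode_base64 string_in)

-- ===== LEMMAS AND PROOFS =====

-- chunk-shaped characterisation of A's first pass (raw 6-bit codes, before translation)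
def pvRawF : List Char → List Char
  | [] => []
  | [a] => [3,2,1,0].map (fun ch => Char.ofNat (((a.toNat <<< 16) >>> (6 * ch)) &&& 63))
  | [a, b] => [3,2,1,0].map (fun ch => Char.ofNat ((((a.toNat <<< 16) ||| (b.toNat <<< 8)) >>> (6 * ch)) &&& 63))
  | a :: b :: c :: rest =>
      [3,2,1,0].map (fun ch => Char.ofNat ((((a.toNat <<< 16) ||| (b.toNat <<< 8) ||| c.toNat) >>> (6 * ch)) &&& 63))
        ++ pvRawF rest

theorem pvGetD_drop (s : List Char) (i j : Nat) : (s.drop i).getD j ' ' = s.getD (i + j) ' ' := by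
  simp [List.getD_eq_getElem?_getD, List.getElem?_drop]

theorem pvEncALoop_eq (r : Nat) : ∀ (s : List Char) (i : Nat) (out : List Char),
    s.length - i = r → i % 3 = 0 →
    pvEncALoop s s.length ((3 - s.length % 3) % 3) i out = out ++ pvRawF (s.drop i) := by
  induction r using Nat.strong_induction_on with
  | _ r IH =>
    intro s i out hr hi
    rw [pvEncALoop]
    by_cases h : i < s.length
    · rw [dif_pos h]
      have hdl : (s.drop i).length = s.length - i := List.length_drop
      rcases hd : s.drop i with _ | ⟨a, _ | ⟨b, _ | ⟨c, rest⟩⟩⟩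
      · rw [hd] at hdl; simp at hdl; omega
      · -- last chunk of one byte: empty_bytes = 2
        rw [hd] at hdl
        have h1 : s.length - i = 1 := by simpa using hdl.symm
        have ha : pvOrdAt s i = a.toNat := by
          have := pvGetD_drop s i 0; rw [hd] at this; simp at this
          simp [pvOrdAt, ← this]
        have heb : (3 - s.length % 3) % 3 = 2 := by omega
        have hle : s.length - i ≤ 3 := by omega
        have IH' : ∀ o, pvEncALoop s s.length 2 (i+3) o = o ++ pvRawF (s.drop (i+3)) := by
          intro o
          have := IH (s.length - (i+3)) (by omega) s (i+3) o rfl (by omega)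
          rwa [heb] at this
        rw [if_pos hle, heb]
        simp only [ha]
        rw [IH']
        rw [List.drop_eq_nil_of_le (by omega)]
        simp [pvRawF]
      · -- last chunk of two bytes: empty_bytes = 1
        rw [hd] at hdl
        have h1 : s.length - i = 2 := by simpa using hdl.symm
        have ha : pvOrdAt s i = a.toNat := by
          have := pvGetD_drop s i 0; rw [hd] at this; simp at this
          simp [pvOrdAt, ← this]
        have hb : pvOrdAt s (i+1) = b.toNat := by
          have := pvGetD_drop s i 1; rw [hd] at this; simp at this
          simp [pvOrdAt, ← this]
        have heb : (3 - s.length % 3) % 3 = 1 := by omega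
        have hle : s.length - i ≤ 3 := by omega
        have IH' : ∀ o, pvEncALoop s s.length 1 (i+3) o = o ++ pvRawF (s.drop (i+3)) := by
          intro o
          have := IH (s.length - (i+3)) (by omega) s (i+3) o rfl (by omega)
          rwa [heb] at this
        rw [if_pos hle, heb]
        simp only [ha, hb]
        rw [IH']
        rw [List.drop_eq_nil_of_le (by omega)]
        simp [pvRawF]
      · -- full chunk of three bytes
        rw [hd] at hdl
        simp at hdl
        have h3 : s.length - i = 3 + rest.length := by omega
        have ha : pvOrdAt s i = a.toNat := by
          have := pvGetD_drop s i 0; rw [hd] at this; simp at this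
          simp [pvOrdAt, ← this]
        have hb : pvOrdAt s (i+1) = b.toNat := by
          have := pvGetD_drop s i 1; rw [hd] at this; simp at this
          simp [pvOrdAt, ← this]
        have hc : pvOrdAt s (i+2) = c.toNat := by
          have := pvGetD_drop s i 2; rw [hd] at this; simp at this
          simp [pvOrdAt, ← this]
        have hdrop : s.drop (i+3) = rest := by
          have : (s.drop i).drop 3 = s.drop (i + 3) := by
            rw [List.drop_drop]
          rw [← this, hd]; rfl
        by_cases hle : s.length - i ≤ 3
        · have h0 : rest = [] := by
            have : rest.length = 0 := by omega
            simpa using this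
          have heb : (3 - s.length % 3) % 3 = 0 := by omega
          have IH' : ∀ o, pvEncALoop s s.length 0 (i+3) o = o ++ pvRawF (s.drop (i+3)) := by
            intro o
            have := IH (s.length - (i+3)) (by omega) s (i+3) o rfl (by omega)
            rwa [heb] at this
          rw [if_pos hle, heb]
          simp only [ha, hb, hc]
          rw [IH', hdrop, h0]
          simp [pvRawF]
        · rw [if_neg hle]
          simp only [ha, hb, hc]
          rw [IH (s.length - (i+3)) (by omega) s (i+3) _ rfl (by omega), hdrop]
          simp [pvRawF, List.append_assoc]
    · rw [dif_neg h]
      rw [List.drop_eq_nil_of_le (by omega)]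
      simp [pvRawF]

-- on each of the 64 possible raw codes, A's if-chain lands on B's alphabet table
theorem pvPoint : ∀ v ∈ List.range 64, Char.ofNat (pvTranslate (Char.ofNat v).toNat) = pvALPHABET.getD v '=' := by
  decide

theorem pvTrans_masked' (g : Nat) :
    Char.ofNat (pvTranslate (Char.ofNat (g &&& 63)).toNat) = pvALPHABET.getD (g &&& 63) '=' := by
  apply pvPoint
  have : g &&& 63 ≤ 63 := Nat.and_le_right
  simp [List.mem_range]; omega

theorem pvRawF_map_translate (l : List Char) :
    (pvRawF l).map (fun c => Char.ofNat (pvTranslate c.toNat)) = pvEncBLoop l := by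
  induction l using pvEncBLoop.induct with
  | case1 => simp [pvRawF, pvEncBLoop]
  | case2 a =>
    simp [pvRawF, pvEncBLoop, pvQuad, pvTrans_masked']
  | case3 a b =>
    simp [pvRawF, pvEncBLoop, pvQuad, pvTrans_masked']
  | case4 a b c rest ih =>
    simp [pvRawF, pvEncBLoop, pvQuad, pvTrans_masked', ih]

theorem pvEncBLoop_len (l : List Char) (h : l ≠ []) : 4 ≤ (pvEncBLoop l).length := by
  rcases l with _ | ⟨a, _ | ⟨b, _ | ⟨c, rest⟩⟩⟩
  · simp at h
  · simp [pvEncBLoop, pvQuad]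
  · simp [pvEncBLoop, pvQuad]
  · simp [pvEncBLoop, pvQuad]

theorem encode_base64_eq (string_in : String) : encode_base64 string_in = encode_base64_alt string_in := by
  unfold encode_base64 encode_base64_alt
  have h1 := pvEncALoop_eq (string_in.toList.length) string_in.toList 0 [] (by omega) (by omega)
  simp only [List.drop_zero, List.nil_append] at h1
  simp only [h1, pvRawF_map_translate]
  congr 1
  rcases h : string_in.toList with _ | ⟨a, t⟩
  · simp [pvEncBLoop]
  · have h4 := pvEncBLoop_len (a :: t) (by simp)
    congr 1
    congr 1
    omega

-- ===== VERDICT (by name: the statement is the Claim_ definition above) =====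
theorem encode_base64_spec : Claim_equal_encode_base64 := by
  intro string_in _
  unfold Spec_encode_base64
  exact encode_base64_eq string_in
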